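-- pv_equiv track=rewrite | github.com/bitstreamshaman/CLI | src/ifw/utils/shell/is_shell.py | _extract_unquoted_parts
-- ===== SOURCE A (Python) =====
-- def _extract_unquoted_parts(text: str) -> str:
--     """Extract only the unquoted parts of the text for analysis."""
--     result = []
--     in_quote = False
--     quote_char = None
--
--     for char in text:
--         if not in_quote and char in ["'", '"']:
--             in_quote = True
--             quote_char = char
--         elif in_quote and char == quote_char:
--             in_quote = False
--             quote_char = None
--         elif not in_quote:
--             result.append(char)
--
--     # Remove the command part (first word)
--     unquoted_text = ''.join(result).strip()
--     words = unquoted_text.split()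
--     if words:
--         return ' '.join(words[1:])  # Skip first word (command)
--     return ''
-- ===== SOURCE B (Python) =====
-- def _extract_unquoted_parts(text: str) -> str:
--     """Extract only the unquoted parts of the text for analysis."""
--     parts = []
--     i = 0
--     n = len(text)
--     while i < n:
--         c = text[i]
--         if c in "'\"":
--             j = text.find(c, i + 1)
--             if j == -1:
--                 break  # unterminated quote: the rest is dropped
--             i = j + 1  # skip the quoted region including both quotes
--         else:
--             parts.append(c)
--             i += 1
--     words = ''.join(parts).split()
--     return ' '.join(words[1:])
-- ===== Notes on version B (the rewrite author's own statement) =====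
-- stated objective: alternative
-- what changed: Replaced the char-by-char in_quote/quote_char state machine with an index-based skip-ahead scan: on a quote, find the matching close quote and jump past the whole quoted region (dropping the rest on an unterminated quote); the redundant .strip() and the empty-words guard are dropped.
import Mathlib
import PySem

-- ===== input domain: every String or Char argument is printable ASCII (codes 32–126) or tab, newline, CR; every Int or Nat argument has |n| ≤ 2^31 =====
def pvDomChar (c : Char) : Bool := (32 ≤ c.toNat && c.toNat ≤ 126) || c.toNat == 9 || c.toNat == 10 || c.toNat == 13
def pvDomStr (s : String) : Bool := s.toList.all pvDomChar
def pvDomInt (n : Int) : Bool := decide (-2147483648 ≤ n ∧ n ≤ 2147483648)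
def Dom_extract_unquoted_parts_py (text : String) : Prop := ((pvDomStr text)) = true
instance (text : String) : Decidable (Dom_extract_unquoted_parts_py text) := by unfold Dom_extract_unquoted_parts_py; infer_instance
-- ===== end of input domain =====

-- B replaces A's in_quote/quote_char state machine by a skip-ahead scan (jump past each
-- quoted region at once) and drops the redundant strip and empty-words guard; same cost.

-- ===== PORT A =====
-- the 'for char in text' loop with state (in_quote, quote_char), emitting unquoted chars
def pvALoop : List Char → Bool → Option Char → List Char
  | [], _, _ => []
  | ch :: rest, in_quote, quote_char =>
    if !in_quote && (ch == '\'' || ch == '"') then pvALoop rest true (some ch)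
    else if in_quote && (some ch == quote_char) then pvALoop rest false none
    else if !in_quote then ch :: pvALoop rest in_quote quote_char
    else pvALoop rest in_quote quote_char

def extract_unquoted_parts_py (text : String) : String :=
  let unquoted_text := PySem.Chars.strip (pvALoop text.toList false none)
  let words := PySem.Chars.split₀ unquoted_text
  if words ≠ [] then String.mk (PySem.Chars.join [' '] (words.drop 1)) else ""

-- ===== PORT B =====
-- the index-based while loop; 'text.find(c, i+1)' is ported as dropWhile to the first
-- occurrence of c in the remaining suffix (exact: find returns the first occurrence, -1 = none)
def pvBLoop : List Char → List Char
  | [] => []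
  | c :: rest =>
    if c == '\'' || c == '"' then
      if h : rest.dropWhile (fun x => x != c) = [] then []
      else pvBLoop (rest.dropWhile (fun x => x != c)).tail
    else c :: pvBLoop rest
  termination_by l => l.length
  decreasing_by
    · have h2 := List.length_dropWhile_le (fun x => x != c) rest
      have h3 : (rest.dropWhile (fun x => x != c)).length ≠ 0 := by
        simpa [List.length_eq_zero_iff] using h
      simp [List.length_tail]; omega
    · simp

def extract_unquoted_parts_py_alt (text : String) : String :=
  let words := PySem.Chars.split₀ (pvBLoop text.toList)
  String.mk (PySem.Chars.join [' '] (words.drop 1))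

-- ===== PRECONDITION & SPEC =====
def Spec_extract_unquoted_parts_py (text : String) (out : String) : Prop := out = extract_unquoted_parts_py_alt text
instance (text : String) (out : String) : Decidable (Spec_extract_unquoted_parts_py text out) := by unfold Spec_extract_unquoted_parts_py; infer_instance

-- ===== CLAIM (what is proved, stated in full; the proofs are below) =====
def Claim_equal_extract_unquoted_parts_py : Prop := ∀ (text : String), Dom_extract_unquoted_parts_py text → Spec_extract_unquoted_parts_py text (extract_unquoted_parts_py text)

-- ===== LEMMAS AND PROOFS =====

-- inside a quote with char q, A skips to just past the first occurrence of q (or drops the rest)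
theorem aLoop_skip (l : List Char) (q : Char) :
    pvALoop l true (some q) =
      match l.dropWhile (fun x => x != q) with
      | [] => []
      | _ :: r => pvALoop r false none := by
  induction l with
  | nil => rfl
  | cons ch rest ih =>
    by_cases hc : ch = q
    · subst hc; simp [pvALoop]
    · simp [pvALoop, hc, ih]

-- the two scanners agree
theorem scan_eq (l : List Char) : pvALoop l false none = pvBLoop l := by
  have key : ∀ n l, l.length ≤ n → pvALoop l false none = pvBLoop l := by
    intro n
    induction n with
    | zero =>
      intro l h
      have : l = [] := by cases l <;> simp_all
      subst this; simp [pvALoop, pvBLoop]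
    | succ n ih =>
      intro l h
      cases l with
      | nil => simp [pvALoop, pvBLoop]
      | cons c rest =>
        by_cases hq : c = '\'' ∨ c = '"'
        · have hb : (c == '\'' || c == '"') = true := by
            rcases hq with hq | hq <;> simp [hq]
          have hA : pvALoop (c :: rest) false none = pvALoop rest true (some c) := by
            simp [pvALoop, hb]
          rw [hA, aLoop_skip]
          cases hd : rest.dropWhile (fun x => x != c) with
          | nil => simp [pvBLoop, hb, hd]
          | cons x r =>
            have hlen := List.length_dropWhile_le (fun x => x != c) rest
            rw [hd] at hlen
            simp only [List.length_cons] at hlen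
            have hr : r.length ≤ n := by simp at h; omega
            simp only [pvBLoop, hb, hd, if_true]
            rw [ih r hr]
            simp
        · rw [not_or] at hq
          have hb : (c == '\'' || c == '"') = false := by
            simp [hq.1, hq.2]
          have hr : rest.length ≤ n := by simp at h; omega
          simp [pvALoop, pvBLoop, hb, ih rest hr]
  exact key l.length l le_rfl

-- split₀.go on an all-whitespace list just flushes the current word
theorem go_ws (ws : List Char) (hws : ∀ c ∈ ws, PySem.Chars.isspace c = true) :
    ∀ cur acc, PySem.Chars.split₀.go ws cur acc =
      (if cur.isEmpty then acc.reverse else (cur.reverse :: acc).reverse) := by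
  induction ws with
  | nil => intro cur acc; simp [PySem.Chars.split₀.go]
  | cons w ws ih =>
    intro cur acc
    have hw : PySem.Chars.isspace w = true := hws w (by simp)
    have hws' : ∀ c ∈ ws, PySem.Chars.isspace c = true := fun c hc => hws c (by simp [hc])
    simp only [PySem.Chars.split₀.go, hw, if_true]
    by_cases hcur : cur.isEmpty
    · simp [hcur, ih hws' [] acc]
    · simp [hcur, ih hws' [] (cur.reverse :: acc)]

theorem go_append_ws (s ws : List Char) (hws : ∀ c ∈ ws, PySem.Chars.isspace c = true) :
    ∀ cur acc, PySem.Chars.split₀.go (s ++ ws) cur acc = PySem.Chars.split₀.go s cur acc := by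
  induction s with
  | nil =>
    intro cur acc
    simp only [List.nil_append, go_ws ws hws, PySem.Chars.split₀.go]
  | cons c s ih =>
    intro cur acc
    simp only [List.cons_append, PySem.Chars.split₀.go]
    split_ifs <;> apply ih

theorem go_lstrip (s : List Char) (acc : List (List Char)) :
    PySem.Chars.split₀.go (List.dropWhile PySem.Chars.isspace s) [] acc
      = PySem.Chars.split₀.go s [] acc := by
  induction s with
  | nil => rfl
  | cons c s ih =>
    by_cases hc : PySem.Chars.isspace c
    · simp only [List.dropWhile_cons, hc, if_true, ih]
      simp [PySem.Chars.split₀.go, hc]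
    · simp [hc]

theorem split₀_strip (s : List Char) :
    PySem.Chars.split₀ (PySem.Chars.strip s) = PySem.Chars.split₀ s := by
  have hdecomp : ∀ t : List Char,
      t = PySem.Chars.rstrip t ++ (List.takeWhile PySem.Chars.isspace t.reverse).reverse := by
    intro t
    simp only [PySem.Chars.rstrip]
    calc t = t.reverse.reverse := (List.reverse_reverse t).symm
      _ = (List.takeWhile PySem.Chars.isspace t.reverse
            ++ List.dropWhile PySem.Chars.isspace t.reverse).reverse := by
          rw [List.takeWhile_append_dropWhile]
      _ = (List.dropWhile PySem.Chars.isspace t.reverse).reverse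
            ++ (List.takeWhile PySem.Chars.isspace t.reverse).reverse := by
          rw [List.reverse_append]
  have hws : ∀ t : List Char, ∀ c ∈ (List.takeWhile PySem.Chars.isspace t.reverse).reverse,
      PySem.Chars.isspace c = true := by
    intro t c hc
    rw [List.mem_reverse] at hc
    exact List.mem_takeWhile_imp hc
  unfold PySem.Chars.split₀ PySem.Chars.strip
  calc PySem.Chars.split₀.go (PySem.Chars.rstrip (PySem.Chars.lstrip s)) [] []
      = PySem.Chars.split₀.go (PySem.Chars.rstrip (PySem.Chars.lstrip s)
          ++ (List.takeWhile PySem.Chars.isspace (PySem.Chars.lstrip s).reverse).reverse) [] [] := by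
        rw [go_append_ws _ _ (hws (PySem.Chars.lstrip s))]
    _ = PySem.Chars.split₀.go (PySem.Chars.lstrip s) [] [] := by rw [← hdecomp]
    _ = PySem.Chars.split₀.go s [] [] := go_lstrip s []

-- ===== VERDICT (by name: the statement is the Claim_ definition above) =====
theorem extract_unquoted_parts_py_spec : Claim_equal_extract_unquoted_parts_py := by
  intro text _
  unfold Spec_extract_unquoted_parts_py extract_unquoted_parts_py extract_unquoted_parts_py_alt
  simp only [scan_eq, split₀_strip]
  cases h : PySem.Chars.split₀ (pvBLoop text.toList) with
  | nil => simp [PySem.Chars.join]; rfl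
  | cons w ws => simp
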